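-- pv_equiv track=rewrite | github.com/rupol/Algorithms-Lecture | src/challenges/sprint_scratch.py | second_func
-- ===== SOURCE A (Python) =====
-- def second_func(n):
--     sum = 0
--     for i in range(n):  # will run n times - O(n) * O(1) = O(n)
--         j = 1  # O(1)
--         while j < n:  # will run n times - O(n)
--             j *= 2
--             sum += 1
--     return sum
-- ===== SOURCE B (Python) =====
-- def second_func(n):
--     # closed form: each of the n outer iterations performs ceil(log2(n)) doublings,
--     # and ceil(log2(n)) == (n-1).bit_length() for n >= 2; for n < 2 the sum is 0.
--     if n < 2:
--         return 0
--     return n * (n - 1).bit_length()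
-- ===== Notes on version B (the rewrite author's own statement) =====
-- stated objective: faster
-- what changed: replaced the n-times-repeated doubling loop by the closed form n * (n-1).bit_length() (= n * ceil(log2 n)), 0 for n < 2
import Mathlib
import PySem

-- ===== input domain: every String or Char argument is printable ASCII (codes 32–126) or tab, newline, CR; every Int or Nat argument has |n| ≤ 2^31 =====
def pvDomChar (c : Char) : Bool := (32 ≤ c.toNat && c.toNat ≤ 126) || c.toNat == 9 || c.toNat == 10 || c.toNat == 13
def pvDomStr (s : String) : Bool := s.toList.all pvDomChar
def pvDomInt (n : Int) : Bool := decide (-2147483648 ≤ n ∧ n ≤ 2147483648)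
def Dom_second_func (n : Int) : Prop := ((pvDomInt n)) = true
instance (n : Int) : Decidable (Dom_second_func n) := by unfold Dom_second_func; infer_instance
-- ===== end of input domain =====

-- B replaces A's n repetitions of a doubling loop by the closed form n * (n-1).bit_length() (0 for n < 2); objective: faster.

-- ===== PORT A =====
-- inner 'while j < n: j *= 2; sum += 1' (at every call site j = 1, so the guard 1 ≤ j is
-- always true in Python's executions; it only serves Lean's termination)
def second_func_while (n j sum : Int) : Int :=
  if 1 ≤ j ∧ j < n then second_func_while n (j * 2) (sum + 1) else sum
  termination_by (n - j).toNat
  decreasing_by omega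

def second_func (n : Int) : Int :=
  (PySem.List.pyRange 0 n 1).foldl (fun sum _ => second_func_while n 1 sum) 0

-- ===== PORT B =====
def second_func_alt (n : Int) : Int :=
  if n < 2 then 0 else n * (PySem.Int.bitLength (n - 1) : Int)

-- ===== PRECONDITION & SPEC =====
def Spec_second_func (n : Int) (out : Int) : Prop := out = second_func_alt n
instance (n : Int) (out : Int) : Decidable (Spec_second_func n out) := by unfold Spec_second_func; infer_instance

-- ===== CLAIM (what is proved, stated in full; the proofs are below) =====
def Claim_equal_second_func : Prop := ∀ (n : Int), Dom_second_func n → Spec_second_func n (second_func n)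

-- ===== LEMMAS AND PROOFS =====

-- The inner while loop adds bitLength ((n-1) // j) to sum (for 1 ≤ j, 1 ≤ n).
theorem second_func_while_eq (k : Nat) : ∀ (n j sum : Int), 1 ≤ n → 1 ≤ j → (n - j).toNat ≤ k →
    second_func_while n j sum = sum + (PySem.Int.bitLength (PySem.Int.floordiv (n - 1) j) : Int) := by
  induction k with
  | zero =>
    intro n j sum hn hj hk
    rw [second_func_while]
    have hnj : ¬ (1 ≤ j ∧ j < n) := by omega
    rw [if_neg hnj]
    have h0 : PySem.Int.floordiv (n - 1) j = 0 := by
      rw [PySem.Int.floordiv_eq_iff_of_pos (by omega)]; omega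
    simp [h0]
  | succ k ih =>
    intro n j sum hn hj hk
    rw [second_func_while]
    by_cases hlt : j < n
    · rw [if_pos ⟨hj, hlt⟩]
      rw [ih n (j * 2) (sum + 1) hn (by omega) (by omega)]
      have hq : PySem.Int.floordiv (n - 1) (j * 2)
          = PySem.Int.floordiv (PySem.Int.floordiv (n - 1) j) 2 := by
        rw [PySem.Int.floordiv_eq_ediv_of_pos (by omega : (0:Int) < j * 2),
            PySem.Int.floordiv_eq_ediv_of_pos (by omega : (0:Int) < j),
            PySem.Int.floordiv_eq_ediv_of_pos (by omega : (0:Int) < 2),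
            Int.ediv_ediv_of_nonneg (by omega : (0:Int) ≤ j)]
      have hpos : 0 < PySem.Int.floordiv (n - 1) j := by
        have := (PySem.Int.le_floordiv_iff_mul_le (a := n - 1) (q := 1) (by omega : (0:Int) < j)).mpr (by omega)
        omega
      rw [hq, PySem.Int.bitLength_of_pos hpos]
      push_cast
      ring
    · rw [if_neg (by omega)]
      have h0 : PySem.Int.floordiv (n - 1) j = 0 := by
        rw [PySem.Int.floordiv_eq_iff_of_pos (by omega)]; omega
      simp [h0]

theorem foldl_add_const (c : Int) : ∀ (l : List Int) (a : Int),
    l.foldl (fun s (_ : Int) => s + c) a = a + l.length * c := by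
  intro l
  induction l with
  | nil => simp
  | cons x xs ih => intro a; simp [List.foldl, ih]; ring

-- ===== VERDICT (by name: the statement is the Claim_ definition above) =====
theorem second_func_spec : Claim_equal_second_func := by
  intro n _
  unfold Spec_second_func second_func second_func_alt
  by_cases hn : n ≤ 0
  · have : PySem.List.pyRange 0 n 1 = [] := by
      rw [PySem.List.pyRange_one]
      simp
      omega
    rw [this, if_pos (by omega : n < 2)]
    simp
  · have hfold : (PySem.List.pyRange 0 n 1).foldl (fun sum _ => second_func_while n 1 sum) 0
        = (PySem.List.pyRange 0 n 1).foldl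
            (fun s (_ : Int) => s + (PySem.Int.bitLength (PySem.Int.floordiv (n - 1) 1) : Int)) 0 := by
      apply PySem.List.foldl_congr_mem _ _ _ _
      intro s x _
      exact second_func_while_eq (n - 1).toNat n 1 s (by omega) (by omega) (by omega)
    rw [hfold, foldl_add_const, PySem.List.length_pyRange_one]
    have hdiv1 : PySem.Int.floordiv (n - 1) 1 = n - 1 := by
      rw [PySem.Int.floordiv_eq_ediv_of_pos (by omega)]; simp
    rw [hdiv1]
    by_cases h1 : n = 1
    · subst h1; simp [PySem.Int.bitLength]
    · rw [if_neg (by omega)]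
      have : ((n - 0).toNat : Int) = n := by omega
      rw [this]
      ring
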